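-- pv_equiv track=rewrite | github.com/unbounded-ai/slackgentic-team | src/agent_harness/runtime/power.py | parse_pmset_custom
-- ===== SOURCE A (Python) =====
-- def parse_pmset_custom(output: str) -> dict[str, dict[str, str]]:
--     settings: dict[str, dict[str, str]] = {}
--     current_source: str | None = None
--     for raw_line in output.splitlines():
--         line = raw_line.strip()
--         if not line:
--             continue
--         if line.endswith(":"):
--             current_source = line[:-1]
--             settings.setdefault(current_source, {})
--             continue
--         if current_source is None:
--             continue
--         parts = line.split()
--         if len(parts) < 2:
--             continue
--         settings[current_source][parts[0]] = parts[-1]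
--     return settings
-- ===== SOURCE B (Python) =====
-- def parse_pmset_custom(output: str) -> dict[str, dict[str, str]]:
--     # phase 1: group stripped non-empty lines into (header, body) sections
--     sections: list[tuple[str, list[str]]] = []
--     for raw_line in output.splitlines():
--         line = raw_line.strip()
--         if not line:
--             continue
--         if line.endswith(":"):
--             sections.append((line[:-1], []))
--         elif sections:
--             sections[-1][1].append(line)
--     # phase 2: build the nested dict, merging repeated headers in order
--     settings: dict[str, dict[str, str]] = {}
--     for name, body in sections:
--         dest = settings.setdefault(name, {})
--         for line in body:
--             parts = line.split()
--             if len(parts) >= 2: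
--                 dest[parts[0]] = parts[-1]
--     return settings
-- ===== Notes on version B (the rewrite author's own statement) =====
-- stated objective: alternative
-- what changed: Replaces A's single-pass state machine (dict + current_source mutated per line) with a two-phase decomposition: first group stripped non-empty lines into (header, body) sections, then build the nested dict from the sections, merging repeated headers via setdefault.
import Mathlib
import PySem

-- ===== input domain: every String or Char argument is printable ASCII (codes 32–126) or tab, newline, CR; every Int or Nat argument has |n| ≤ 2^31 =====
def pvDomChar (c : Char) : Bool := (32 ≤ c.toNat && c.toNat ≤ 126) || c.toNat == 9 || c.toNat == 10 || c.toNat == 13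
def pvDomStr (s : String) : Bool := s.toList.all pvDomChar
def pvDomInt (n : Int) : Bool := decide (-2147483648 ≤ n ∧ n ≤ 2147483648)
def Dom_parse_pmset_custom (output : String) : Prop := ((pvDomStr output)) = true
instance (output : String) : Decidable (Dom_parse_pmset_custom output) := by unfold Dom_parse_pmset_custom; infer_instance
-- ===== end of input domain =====

-- B regroups A's inline state machine into two phases (group lines into sections, then build the nested dict); same result, alternative decomposition.

-- ===== PORT A =====
-- A's loop body: state = (settings, current_source); settings[current]'s update is
-- Dict.modify at the current key (the key is always present when current ≠ none, so the default is never used).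
def pvStepA (st : PySem.Dict String (PySem.Dict String String) × Option String)
    (raw_line : String) : PySem.Dict String (PySem.Dict String String) × Option String :=
  let line := PySem.Str.strip raw_line
  if line = "" then st
  else if PySem.Str.endswith line ":" then
    let current := PySem.Str.slice line none (some (-1))
    (st.1.setdefault current PySem.Dict.empty, some current)
  else
    match st.2 with
    | none => st
    | some cs =>
      let parts := PySem.Str.split₀ line
      if parts.length < 2 then st
      else (st.1.modify cs PySem.Dict.empty
              (fun d => d.insert (PySem.List.pyGetD parts 0 "") (PySem.List.pyGetD parts (-1) "")), st.2)

def parse_pmset_custom (output : String) : List (String × List (String × String)) :=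
  let settings := (PySem.Str.splitlines output).foldl pvStepA (PySem.Dict.empty, none)
  settings.1.items.map (fun p => (p.1, p.2.items))

-- ===== PORT B =====
-- phase-1 loop body of Source B: append a new (header, []) section, or append the line to the last section
def pvStepG (acc : List (String × List String)) (raw_line : String) : List (String × List String) :=
  let line := PySem.Str.strip raw_line
  if line = "" then acc
  else if PySem.Str.endswith line ":" then acc ++ [(PySem.Str.slice line none (some (-1)), [])]
  else
    match acc.getLast? with
    | none => acc
    | some (n, body) => acc.dropLast ++ [(n, body ++ [line])]

-- phase-2 inner loop body of Source B
def pvMergeLine (d : PySem.Dict String String) (line : String) : PySem.Dict String String :=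
  let parts := PySem.Str.split₀ line
  if parts.length < 2 then d
  else d.insert (PySem.List.pyGetD parts 0 "") (PySem.List.pyGetD parts (-1) "")

-- phase-2 outer loop body: 'dest = settings.setdefault(name, {})' followed by in-place updates
-- of the aliased dest IS Dict.modify at name with default {} (same position, same appended-empty case).
def pvBuild (settings : PySem.Dict String (PySem.Dict String String))
    (s : String × List String) : PySem.Dict String (PySem.Dict String String) :=
  settings.modify s.1 PySem.Dict.empty (fun d => s.2.foldl pvMergeLine d)

def parse_pmset_custom_alt (output : String) : List (String × List (String × String)) :=
  let sections := (PySem.Str.splitlines output).foldl pvStepG []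
  let settings := sections.foldl pvBuild PySem.Dict.empty
  settings.items.map (fun p => (p.1, p.2.items))

-- ===== PRECONDITION & SPEC =====
def Spec_parse_pmset_custom (output : String) (out : List (String × List (String × String))) : Prop := out = parse_pmset_custom_alt output
instance (output : String) (out : List (String × List (String × String))) : Decidable (Spec_parse_pmset_custom output out) := by unfold Spec_parse_pmset_custom; infer_instance

-- ===== CLAIM (what is proved, stated in full; the proofs are below) =====
def Claim_equal_parse_pmset_custom : Prop := ∀ (output : String), Dom_parse_pmset_custom output → Spec_parse_pmset_custom output (parse_pmset_custom output)

-- ===== LEMMAS AND PROOFS =====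

-- inserting the value a key already holds changes nothing (keys unique)
lemma pv_insert_self {κ ν : Type} [BEq κ] [LawfulBEq κ] (d : PySem.Dict κ ν) (k : κ) (v : ν)
    (hnd : d.keys.Nodup) (h : d.get? k = some v) : d.insert k v = d := by
  apply PySem.Dict.ext
  have hc : d.contains k = true := by rw [PySem.Dict.contains_eq_isSome_get?, h]; rfl
  rw [PySem.Dict.items_insert_of_contains d v hc]
  have : ∀ p ∈ d.items, (if (p.1 == k) = true then (k, v) else p) = p := by
    intro p hp
    split_ifs with hk
    · have hk' : p.1 = k := by exact eq_of_beq hk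
      have : d.get? p.1 = some p.2 := PySem.Dict.get?_of_mem_items d (by exact hp) hnd
      rw [hk', h] at this
      cases p
      simp_all
    · rfl
  rw [List.map_congr_left this]; simp

-- modify with the identity function = setdefault with the default (keys unique)
lemma pv_modify_id {κ ν : Type} [BEq κ] [LawfulBEq κ] (d : PySem.Dict κ ν) (k : κ) (e : ν)
    (hnd : d.keys.Nodup) : d.modify k e (fun x => x) = d.setdefault k e := by
  by_cases hc : d.contains k = true
  · obtain ⟨v, hv⟩ : ∃ v, d.get? k = some v := by
      rw [PySem.Dict.contains_eq_isSome_get?] at hc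
      exact Option.isSome_iff_exists.mp hc
    rw [PySem.Dict.setdefault_of_contains d e hc]
    show d.insert k (d.getD k e) = d
    rw [PySem.Dict.getD_of_get?_eq_some d e hv]
    exact pv_insert_self d k v hnd hv
  · have hc' : d.contains k = false := by simpa using hc
    rw [PySem.Dict.setdefault_of_not_contains d e hc']
    show d.insert k (d.getD k e) = d.insert k e
    rw [PySem.Dict.getD_of_not_contains d e hc']

-- two modifies at the same key compose (no key hypothesis needed)
lemma pv_modify_modify {κ ν : Type} [BEq κ] [LawfulBEq κ] (d : PySem.Dict κ ν) (k : κ) (e : ν)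
    (f g : ν → ν) : (d.modify k e f).modify k e g = d.modify k e (fun x => g (f x)) := by
  show (d.insert k (f (d.getD k e))).insert k (g ((d.insert k (f (d.getD k e))).getD k e))
      = d.insert k (g (f (d.getD k e)))
  rw [PySem.Dict.getD_insert_self, PySem.Dict.insert_insert_self]

lemma pv_nodup_build (acc : List (String × List String))
    (D : PySem.Dict String (PySem.Dict String String)) (hnd : D.keys.Nodup) :
    (acc.foldl pvBuild D).keys.Nodup := by
  exact PySem.Dict.nodup_keys_foldl_modify_key acc Prod.fst PySem.Dict.empty
    (fun _ s => fun d => s.2.foldl pvMergeLine d) D hnd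

-- one line keeps the simulation: A's step on (build, current-header) = build of B's grouping step
lemma pv_step (acc : List (String × List String))
    (D : PySem.Dict String (PySem.Dict String String)) (hnd : D.keys.Nodup) (l : String) :
    pvStepA (acc.foldl pvBuild D, acc.getLast?.map Prod.fst) l
      = ((pvStepG acc l).foldl pvBuild D, (pvStepG acc l).getLast?.map Prod.fst) := by
  unfold pvStepA pvStepG
  by_cases h0 : PySem.Str.strip l = ""
  · simp [h0]
  · simp only [h0, if_false]
    by_cases hh : PySem.Str.endswith (PySem.Str.strip l) ":" = true
    · simp only [hh, if_true, List.foldl_append, List.foldl_cons, List.foldl_nil,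
        List.getLast?_concat, Option.map_some]
      refine Prod.ext ?_ rfl
      show (acc.foldl pvBuild D).setdefault _ PySem.Dict.empty = pvBuild (acc.foldl pvBuild D) _
      unfold pvBuild
      simp only [List.foldl_nil]
      exact (pv_modify_id _ _ _ (pv_nodup_build acc D hnd)).symm
    · simp only [hh]
      rcases List.eq_nil_or_concat acc with hnil | ⟨pre, s, hacc⟩
      · subst hnil; simp
      · obtain ⟨n, body⟩ := s
        subst hacc
        simp only [List.concat_eq_append, List.getLast?_concat, Option.map_some,
          List.dropLast_concat]
        by_cases hp : (PySem.Str.split₀ (PySem.Str.strip l)).length < 2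
        · simp only [hp, if_true, List.foldl_append, List.foldl_cons, List.foldl_nil]
          unfold pvBuild
          simp [pvMergeLine, hp, List.foldl_append]
        · simp only [hp, if_false, List.foldl_append, List.foldl_cons, List.foldl_nil]
          unfold pvBuild
          rw [pv_modify_modify]
          simp [pvMergeLine, hp, List.foldl_append]

lemma pv_main (ls : List String) : ∀ (acc : List (String × List String))
    (D : PySem.Dict String (PySem.Dict String String)), D.keys.Nodup →
    ls.foldl pvStepA (acc.foldl pvBuild D, acc.getLast?.map Prod.fst)
      = ((ls.foldl pvStepG acc).foldl pvBuild D, (ls.foldl pvStepG acc).getLast?.map Prod.fst) := by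
  induction ls with
  | nil => intro acc D hnd; rfl
  | cons l ls ih =>
    intro acc D hnd
    simp only [List.foldl_cons]
    rw [pv_step acc D hnd l]
    exact ih (pvStepG acc l) D hnd

-- ===== VERDICT (by name: the statement is the Claim_ definition above) =====
theorem parse_pmset_custom_spec : Claim_equal_parse_pmset_custom := by
  intro output _
  unfold Spec_parse_pmset_custom parse_pmset_custom parse_pmset_custom_alt
  have h := pv_main (PySem.Str.splitlines output) [] PySem.Dict.empty PySem.Dict.nodup_keys_empty
  simp only [List.foldl_nil, List.getLast?_nil, Option.map_none] at h
  rw [h]
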